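-- pv_equiv track=rewrite | github.com/zobeltran/python-partOne | part1_B.py | find_divisible
-- ===== SOURCE A (Python) =====
-- def find_divisible(a, b, k):
--
--     counter = 0
--     list = []
--
--     for i in range(a, b):
--         if(i % k == 0):
--             counter = counter + 1
--
--     for i in range(a, b):
--         if(i % k == 0):
--             list.append(i)
--
--     convert_to_string= ", ".join(map(str, list))
--
--     return str(counter) + ". " + convert_to_string + " are all divisible by " + str(k)
-- ===== SOURCE B (Python) =====
-- def find_divisible(a, b, k):
--     # Jump straight from multiple to multiple instead of scanning every integer in [a, b).
--     m = abs(k)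
--     start = a + (-a) % m          # smallest multiple of |k| that is >= a
--     multiples = list(range(start, b, m))
--     joined = ", ".join(map(str, multiples))
--     return str(len(multiples)) + ". " + joined + " are all divisible by " + str(k)
-- ===== Notes on version B (the rewrite author's own statement) =====
-- stated objective: faster
-- what changed: B jumps directly over the multiples of |k| with range(start, b, |k|) starting at the first multiple >= a (and reuses the list's length as the count), instead of A's two full scans of every integer in [a, b) testing i % k == 0.
-- outside the precondition, e.g. on find_divisible(0, 0, 0): A returns '0.  are all divisible by 0', B raises ZeroDivisionError
import Mathlib
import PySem

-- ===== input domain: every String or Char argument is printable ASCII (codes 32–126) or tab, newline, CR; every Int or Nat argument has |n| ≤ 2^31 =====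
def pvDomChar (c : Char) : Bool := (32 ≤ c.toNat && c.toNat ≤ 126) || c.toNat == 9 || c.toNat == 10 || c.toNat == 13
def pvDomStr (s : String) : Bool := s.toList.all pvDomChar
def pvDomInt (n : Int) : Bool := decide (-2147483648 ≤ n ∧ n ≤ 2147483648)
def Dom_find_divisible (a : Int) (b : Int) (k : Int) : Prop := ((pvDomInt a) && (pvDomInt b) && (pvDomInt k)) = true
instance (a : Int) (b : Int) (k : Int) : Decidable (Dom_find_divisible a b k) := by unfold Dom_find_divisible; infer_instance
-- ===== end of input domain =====

-- B replaces A's two full scans of [a, b) by stepping through the multiples of |k| directly (faster, asymptotically fewer iterations).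

-- ===== PORT A =====
def find_divisible (a : Int) (b : Int) (k : Int) : String :=
  let counter : Int := (PySem.List.pyRange a b 1).foldl
    (fun c i => if PySem.Int.mod i k == 0 then c + 1 else c) 0
  let lst : List Int := (PySem.List.pyRange a b 1).foldl
    (fun l i => if PySem.Int.mod i k == 0 then l ++ [i] else l) []
  let convert_to_string := PySem.Str.join ", " (lst.map PySem.Int.toStr)
  PySem.Int.toStr counter ++ ". " ++ convert_to_string ++ " are all divisible by " ++ PySem.Int.toStr k

-- ===== PORT B =====
def find_divisible_alt (a : Int) (b : Int) (k : Int) : String :=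
  let m : Int := |k|
  let start : Int := a + PySem.Int.mod (-a) m
  let multiples : List Int := PySem.List.pyRange start b m
  let joined := PySem.Str.join ", " (multiples.map PySem.Int.toStr)
  PySem.Int.toStr (multiples.length : Int) ++ ". " ++ joined ++ " are all divisible by " ++ PySem.Int.toStr k

-- ===== PRECONDITION & SPEC =====
-- Pre_ excludes k = 0, on which A raises ZeroDivisionError whenever a < b; on the vacuous ranges with b <= a the loops never run, so A returns an accidental 'divisible by 0' string that B's direct-stepping algorithm cannot produce (it raises).
def Pre_find_divisible (a : Int) (b : Int) (k : Int) : Prop := k ≠ 0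
instance (a : Int) (b : Int) (k : Int) : Decidable (Pre_find_divisible a b k) := by unfold Pre_find_divisible; infer_instance
def pvWitness_find_divisible : Int × Int × Int := (1, 10, 3)

def Spec_find_divisible (a : Int) (b : Int) (k : Int) (out : String) : Prop := out = find_divisible_alt a b k
instance (a : Int) (b : Int) (k : Int) (out : String) : Decidable (Spec_find_divisible a b k out) := by unfold Spec_find_divisible; infer_instance

-- ===== CLAIM (what is proved, stated in full; the proofs are below) =====
def Claim_equal_find_divisible : Prop := ∀ (a : Int) (b : Int) (k : Int), Dom_find_divisible a b k → Pre_find_divisible a b k → Spec_find_divisible a b k (find_divisible a b k)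

-- ===== LEMMAS AND PROOFS =====

-- A's counting loop is the length of the filtered range.
theorem foldl_count_eq_length_filter (p : Int → Bool) :
    ∀ (xs : List Int) (c : Int),
      xs.foldl (fun c i => if p i then c + 1 else c) c = c + ((xs.filter p).length : Int) := by
  intro xs
  induction xs with
  | nil => intro c; simp
  | cons x xs ih =>
    intro c
    simp only [List.foldl_cons, List.filter_cons]
    by_cases h : p x = true <;> simp [h, ih] <;> push_cast <;> ring

theorem pairwise_lt_pyRange_pos (a b s : Int) (hs : 0 < s) :
    List.Pairwise (· < ·) (PySem.List.pyRange a b s) := by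
  rw [PySem.List.pyRange_of_pos a b hs]
  refine List.Pairwise.map _ ?_ (List.pairwise_lt_range)
  intro i j hij
  have : (i : Int) < (j : Int) := by exact_mod_cast hij
  nlinarith

theorem filter_range_eq_multiples (a b k : Int) (hk : k ≠ 0) :
    (PySem.List.pyRange a b 1).filter (fun i => PySem.Int.mod i k == 0)
      = PySem.List.pyRange (a + PySem.Int.mod (-a) |k|) b |k| := by
  set m : Int := |k| with hm
  have hmpos : 0 < m := abs_pos.mpr hk
  set r : Int := PySem.Int.mod (-a) m with hr
  have hr0 : 0 ≤ r := PySem.Int.mod_nonneg _ hmpos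
  have hrlt : r < m := PySem.Int.mod_lt _ hmpos
  have hdvd_start : m ∣ (a + r) := by
    have := PySem.Int.floordiv_mul_add_mod (-a) m
    exact ⟨-(PySem.Int.floordiv (-a) m), by linarith⟩
  -- membership on each side
  have hmemA : ∀ x : Int, x ∈ (PySem.List.pyRange a b 1).filter (fun i => PySem.Int.mod i k == 0)
      ↔ (a ≤ x ∧ x < b ∧ m ∣ x) := by
    intro x
    rw [List.mem_filter, PySem.List.mem_pyRange_one]
    simp only [beq_iff_eq, PySem.Int.mod_eq_zero_iff_dvd]
    rw [show (k ∣ x) = (m ∣ x) from by rw [hm, abs_dvd]]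
    tauto
  have hmemB : ∀ x : Int, x ∈ PySem.List.pyRange (a + r) b m ↔ (a ≤ x ∧ x < b ∧ m ∣ x) := by
    intro x
    rw [PySem.List.mem_pyRange_iff_of_pos hmpos]
    constructor
    · rintro ⟨h1, h2, c, hc⟩
      refine ⟨by linarith, h2, ?_⟩
      obtain ⟨d, hd⟩ := hdvd_start
      exact ⟨d + c, by linarith [hd, hc, mul_add m d c]⟩
    · rintro ⟨h1, h2, hx⟩
      have hdx : m ∣ x - (a + r) := (dvd_sub_right hx).mpr hdvd_start
      refine ⟨?_, h2, hdx⟩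
      by_contra hlt
      push_neg at hlt
      obtain ⟨c, hc⟩ := hdx
      have hcneg : c < 0 := by nlinarith
      have : m * c ≤ m * (-1) := by
        apply mul_le_mul_of_nonneg_left (by omega) (le_of_lt hmpos)
      omega
  -- both sides are strictly increasing, hence equal by same membership
  have hpA : List.Pairwise (· < ·) ((PySem.List.pyRange a b 1).filter (fun i => PySem.Int.mod i k == 0)) :=
    List.Pairwise.sublist List.filter_sublist (PySem.List.pairwise_lt_pyRange_one a b)
  have hpB : List.Pairwise (· < ·) (PySem.List.pyRange (a + r) b m) :=
    pairwise_lt_pyRange_pos _ _ _ hmpos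
  have hperm : (PySem.List.pyRange (a + r) b m).Perm
      ((PySem.List.pyRange a b 1).filter (fun i => PySem.Int.mod i k == 0)) := by
    rw [List.perm_ext_iff_of_nodup (hpB.imp ne_of_lt) (hpA.imp ne_of_lt)]
    intro x; rw [hmemA, hmemB]
  have h1 := PySem.List.sorted_eq_of_perm_of_pairwise_lt
      ((PySem.List.pyRange a b 1).filter (fun i => PySem.Int.mod i k == 0))
      (PySem.List.pyRange (a + r) b m) (fun x => x) hperm hpB
  have h2 := PySem.List.sorted_eq_of_perm_of_pairwise_lt
      ((PySem.List.pyRange a b 1).filter (fun i => PySem.Int.mod i k == 0))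
      ((PySem.List.pyRange a b 1).filter (fun i => PySem.Int.mod i k == 0))
      (fun x => x) (List.Perm.refl _) hpA
  rw [← h2, h1]

-- ===== VERDICT (by name: the statement is the Claim_ definition above) =====
theorem find_divisible_spec : Claim_equal_find_divisible := by
  intro a b k _ hk
  unfold Spec_find_divisible find_divisible find_divisible_alt
  have hlist := filter_range_eq_multiples a b k hk
  have hcount := foldl_count_eq_length_filter (fun i => PySem.Int.mod i k == 0) (PySem.List.pyRange a b 1) 0
  have happ := PySem.List.foldl_append_if (fun i => PySem.Int.mod i k == 0) (fun i => i)
      (PySem.List.pyRange a b 1) []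
  simp only [List.map_id'] at happ
  simp only [happ, List.nil_append, hcount, hlist, zero_add]
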